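-- pv_equiv track=rewrite | github.com/jenkins957/advent-of-code | advent_of_code_2015/day03_delivering_presents.py | houses_visited
-- ===== SOURCE A (Python) =====
-- def houses_visited(input):
--     x = 0
--     y = 0
--     locations = set()
--     locations.add((x, y))
--
--     for c in input:
--         if c == '^':
--             y += 1
--         elif c == 'v':
--             y -= 1
--         elif c == '>':
--             x += 1
--         elif c == '<':
--             x -= 1
--
--         locations.add((x,y))
--
--     return locations
-- ===== SOURCE B (Python) =====
-- def _prefix(deltas):
--     out = [0]
--     t = 0
--     for d in deltas:
--         t += d
--         out.append(t)
--     return out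
--
-- def houses_visited(input):
--     xs = _prefix([(c == '>') - (c == '<') for c in input])
--     ys = _prefix([(c == '^') - (c == 'v') for c in input])
--     return set(zip(xs, ys))
-- ===== Notes on version B (the rewrite author's own statement) =====
-- stated objective: alternative
-- what changed: Instead of walking once while mutating an (x,y) position and adding to a set, B processes the two axes independently in staged passes: it maps characters to per-axis step values computed from boolean comparisons (no branch chain), takes a prefix sum of each axis, zips the two coordinate sequences back into positions, and deduplicates once at the end.
import Mathlib
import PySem

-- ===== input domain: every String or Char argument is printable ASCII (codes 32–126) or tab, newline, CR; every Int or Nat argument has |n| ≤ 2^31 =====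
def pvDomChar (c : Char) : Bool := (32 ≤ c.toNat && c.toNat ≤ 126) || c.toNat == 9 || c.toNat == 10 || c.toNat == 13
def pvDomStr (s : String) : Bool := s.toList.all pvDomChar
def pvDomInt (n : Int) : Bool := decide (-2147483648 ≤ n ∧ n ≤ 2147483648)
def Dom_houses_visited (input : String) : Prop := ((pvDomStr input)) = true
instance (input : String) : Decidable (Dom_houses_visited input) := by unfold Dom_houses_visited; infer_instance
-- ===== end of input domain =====

-- B replaces the branch-chain walk with staged per-axis passes: boolean-arithmetic step values, a prefix sum on each axis, zip, then one final dedup (alternative decomposition, same cost).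


-- ===== PORT A =====
-- loop state: current position (x, y) and the set of locations
def hvStepA (st : (Int × Int) × PySem.Set (Int × Int)) (c : Char) : (Int × Int) × PySem.Set (Int × Int) :=
  let p := st.1
  let p' :=
    if c = '^' then (p.1, p.2 + 1)
    else if c = 'v' then (p.1, p.2 - 1)
    else if c = '>' then (p.1 + 1, p.2)
    else if c = '<' then (p.1 - 1, p.2)
    else p
  (p', PySem.Set.add st.2 p')

def houses_visited (input : String) : List (Int × Int) :=
  (input.toList.foldl hvStepA ((0, 0), PySem.Set.add PySem.Set.empty (0, 0))).2

-- ===== PORT B =====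
-- (c == '>') - (c == '<')  and  (c == '^') - (c == 'v')  as Int arithmetic on booleans
def hvDx (c : Char) : Int := (if c = '>' then 1 else 0) - (if c = '<' then 1 else 0)
def hvDy (c : Char) : Int := (if c = '^' then 1 else 0) - (if c = 'v' then 1 else 0)

-- _prefix: running total, appending each partial sum after the initial 0
def hvPrefix (deltas : List Int) : List Int :=
  (deltas.foldl (fun (st : Int × List Int) d => (st.1 + d, st.2 ++ [st.1 + d])) (0, [0])).2

def houses_visited_alt (input : String) : List (Int × Int) :=
  PySem.Set.ofList
    (List.zip (hvPrefix (input.toList.map hvDx)) (hvPrefix (input.toList.map hvDy)))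

-- ===== PRECONDITION & SPEC =====
def Spec_houses_visited (input : String) (out : List (Int × Int)) : Prop := out = houses_visited_alt input
instance (input : String) (out : List (Int × Int)) : Decidable (Spec_houses_visited input out) := by unfold Spec_houses_visited; infer_instance

-- ===== CLAIM =====
def Claim_equal_houses_visited : Prop := ∀ (input : String), Dom_houses_visited input → Spec_houses_visited input (houses_visited input)

-- ===== LEMMAS AND PROOFS =====

-- the exact sequence of positions visited by the walk, including the start
def hvTrail : List Char → Int × Int → List (Int × Int)
  | [], p => [p]
  | c :: cs, p => p :: hvTrail cs (p.1 + hvDx c, p.2 + hvDy c)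

-- A's branch chain moves to exactly (p.1 + hvDx c, p.2 + hvDy c)
lemma hvStepA_eq (p : Int × Int) (s : PySem.Set (Int × Int)) (c : Char) :
    hvStepA (p, s) c =
      ((p.1 + hvDx c, p.2 + hvDy c), PySem.Set.add s (p.1 + hvDx c, p.2 + hvDy c)) := by
  by_cases h1 : c = '^' <;> by_cases h2 : c = 'v' <;> by_cases h3 : c = '>' <;>
    by_cases h4 : c = '<' <;>
    simp_all [hvStepA, hvDx, hvDy, sub_eq_add_neg]

-- set(l ++ [q]) grows by one add
lemma hvSet_append (l : List (Int × Int)) (q : Int × Int) :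
    PySem.Set.ofList (l ++ [q]) = PySem.Set.add (PySem.Set.ofList l) q := by
  simp [PySem.Set.ofList_eq_foldl, List.foldl_append]

-- A's loop accumulates exactly set(trail)
lemma hvA_loop (cs : List Char) (p : Int × Int) (l : List (Int × Int)) :
    (cs.foldl hvStepA (p, PySem.Set.ofList (l ++ [p]))).2
      = PySem.Set.ofList (l ++ hvTrail cs p) := by
  induction cs generalizing p l with
  | nil => simp [hvTrail]
  | cons c cs ih =>
      simp only [List.foldl_cons]
      rw [hvStepA_eq, ← hvSet_append]
      have := ih (p.1 + hvDx c, p.2 + hvDy c) (l ++ [p])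
      simpa [hvTrail] using this
-- the exclusive running sums produced after the initial value
def hvScan : Int → List Int → List Int
  | _, [] => []
  | t, d :: ds => (t + d) :: hvScan (t + d) ds

lemma hvPrefix_loop (ds : List Int) (t : Int) (acc : List Int) :
    (ds.foldl (fun (st : Int × List Int) d => (st.1 + d, st.2 ++ [st.1 + d])) (t, acc)).2
      = acc ++ hvScan t ds := by
  induction ds generalizing t acc with
  | nil => simp [hvScan]
  | cons d ds ih => simpa [hvScan] using ih (t + d) (acc ++ [t + d])

lemma hvPrefix_eq (ds : List Int) : hvPrefix ds = 0 :: hvScan 0 ds := by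
  simpa using hvPrefix_loop ds 0 [0]

-- zipping the two per-axis prefix sequences rebuilds the trail
lemma hvZip_trail (cs : List Char) (x y : Int) :
    List.zip (x :: hvScan x (cs.map hvDx)) (y :: hvScan y (cs.map hvDy))
      = hvTrail cs (x, y) := by
  induction cs generalizing x y with
  | nil => simp [hvScan, hvTrail]
  | cons c cs ih => simpa [hvScan, hvTrail] using ih (x + hvDx c) (y + hvDy c)

-- ===== VERDICT =====
theorem houses_visited_spec : Claim_equal_houses_visited := by
  intro input _
  unfold Spec_houses_visited houses_visited houses_visited_alt
  have hA := hvA_loop input.toList (0, 0) []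
  have : PySem.Set.add PySem.Set.empty ((0 : Int), (0 : Int))
      = PySem.Set.ofList ([] ++ [((0 : Int), (0 : Int))]) := by decide
  rw [this, hA, hvPrefix_eq, hvPrefix_eq, hvZip_trail]
  simp
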